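-- pv_equiv track=rewrite | github.com/Ashiq-am/Path-of-Python | 3.Data Types/Arrays Set 1 and Set 2/Prefix Sum/Find all indices of Array having prefix sum greater than suffix sum/Example 1.py | solve
-- ===== SOURCE A (Python) =====
-- def solve(arr):
-- 	ans = []
--
-- 	# Total_size of the array
-- 	size = len(arr)
--
-- 	# Upto second last inddx
-- 	for idx in range(size-1):
-- 		left_sum = 0
-- 		right_sum = 0
--
-- 		# Calculate left sum
-- 		for left_idx in range(idx + 1):
-- 			left_sum += arr[left_idx]
--
-- 		# Calculate right sum
-- 		for right_idx in range(idx + 1,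
-- 							size, 1):
-- 			right_sum += arr[right_idx]
--
-- 		# check condition
-- 		if (left_sum > right_sum):
-- 			ans.append(idx + 1)
--
-- 	return(ans)
-- ===== SOURCE B (Python) =====
-- def solve(arr):
--     total = sum(arr)
--     ans = []
--     prefix = 0
--     for i, x in enumerate(arr[:-1]):
--         prefix += x
--         if prefix > total - prefix:
--             ans.append(i + 1)
--     return ans
-- ===== Notes on version B (the rewrite author's own statement) =====
-- stated objective: faster
-- what changed: Replaced the quadratic per-index recomputation of left and right sums by a single pass that maintains a running prefix sum and compares it with total - prefix.
import Mathlib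
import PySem

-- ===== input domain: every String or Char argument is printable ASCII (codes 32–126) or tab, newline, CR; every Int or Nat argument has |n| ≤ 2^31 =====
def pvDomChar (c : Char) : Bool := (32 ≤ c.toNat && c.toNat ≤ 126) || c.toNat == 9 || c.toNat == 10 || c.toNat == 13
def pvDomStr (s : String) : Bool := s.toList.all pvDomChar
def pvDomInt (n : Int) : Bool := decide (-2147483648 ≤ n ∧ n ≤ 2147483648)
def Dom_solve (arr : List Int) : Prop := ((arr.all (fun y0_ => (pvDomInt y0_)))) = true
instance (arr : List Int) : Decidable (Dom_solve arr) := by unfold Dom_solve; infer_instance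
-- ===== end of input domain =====

-- B replaces A's quadratic per-index left/right re-summation by a single running-prefix-sum pass (objective: faster).

-- ===== PORT A =====
def solve (arr : List Int) : List Int :=
  let size : Int := arr.length
  (PySem.List.pyRange 0 (size - 1) 1).foldl (fun ans idx =>
    let left_sum := (PySem.List.pyRange 0 (idx + 1) 1).foldl
      (fun s i => s + PySem.List.pyGetD arr i 0) 0
    let right_sum := (PySem.List.pyRange (idx + 1) size 1).foldl
      (fun s i => s + PySem.List.pyGetD arr i 0) 0
    if left_sum > right_sum then ans ++ [idx + 1] else ans) []

-- ===== PORT B =====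
def solve_alt (arr : List Int) : List Int :=
  let total := arr.sum
  ((PySem.List.enumerate (PySem.List.slice arr none (some (-1)))).foldl
    (fun (st : Int × List Int) p =>
      let pre := st.1 + p.2
      (pre, if pre > total - pre then st.2 ++ [p.1 + 1] else st.2)) (0, [])).2

-- ===== PRECONDITION & SPEC =====
def Spec_solve (arr : List Int) (out : List Int) : Prop := out = solve_alt arr
instance (arr : List Int) (out : List Int) : Decidable (Spec_solve arr out) := by unfold Spec_solve; infer_instance

-- ===== CLAIM (what is proved, stated in full; the proofs are below) =====
def Claim_equal_solve : Prop := ∀ (arr : List Int), Dom_solve arr → Spec_solve arr (solve arr)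

-- ===== LEMMAS AND PROOFS =====

-- prefix sums via getD with default 0 (no bound needed: getD past the end adds 0, take clamps)
theorem foldl_range_getD_sum (arr : List Int) : ∀ (m : Nat),
    (List.range m).foldl (fun s k => s + arr.getD k 0) 0 = (arr.take m).sum := by
  intro m
  induction m with
  | zero => simp
  | succ m ih =>
    rw [List.range_succ, List.foldl_append, List.foldl_cons, List.foldl_nil, ih]
    by_cases h : m < arr.length
    · rw [List.getD_eq_getElem arr 0 h]
      exact (List.sum_take_succ arr m h).symm
    · have h' : arr[m]? = none := List.getElem?_eq_none (by omega)
      rw [List.take_of_length_le (by omega), List.take_of_length_le (by omega)]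
      simp [List.getD_eq_getElem?_getD, h']

-- A's inner left loop computes the prefix sum
theorem left_sum_eq (arr : List Int) (k : Nat) :
    (PySem.List.pyRange 0 ((k : Int) + 1) 1).foldl
      (fun s i => s + PySem.List.pyGetD arr i 0) 0 = (arr.take (k + 1)).sum := by
  have hcast : ((k : Int) + 1) = ((k + 1 : Nat) : Int) := by push_cast; ring
  rw [hcast, PySem.List.pyRange_one, List.foldl_map]
  simp only [zero_add, sub_zero, Int.toNat_natCast, PySem.List.pyGetD_natCast]
  exact foldl_range_getD_sum arr (k + 1)

-- A's inner right loop computes the suffix sum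
theorem right_sum_eq (arr : List Int) (k : Nat) :
    (PySem.List.pyRange ((k : Int) + 1) (arr.length : Int) 1).foldl
      (fun s i => s + PySem.List.pyGetD arr i 0) 0 = (arr.drop (k + 1)).sum := by
  have hcast : ((k : Int) + 1) = ((k + 1 : Nat) : Int) := by push_cast; ring
  rw [hcast, PySem.List.foldl_pyRange_pyGetD' arr 0 (fun s i => s + i) 0 (by positivity)]
  rw [Int.toNat_natCast]
  exact (List.sum_eq_foldl).symm

-- A is a filter/map over indices, comparing prefix sum with suffix sum
theorem solve_char (arr : List Int) :
    solve arr = ((List.range (arr.length - 1)).filter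
      (fun k => decide ((arr.take (k + 1)).sum > (arr.drop (k + 1)).sum))).map
        (fun (k : Nat) => ((k : Int) + 1)) := by
  simp only [solve]
  rw [PySem.List.pyRange_one, List.foldl_map]
  have hn : ((arr.length : Int) - 1 - 0).toNat = arr.length - 1 := by omega
  rw [hn]
  rw [PySem.List.foldl_congr_mem (List.range (arr.length - 1))
        _ (fun ans (k : Nat) =>
            if (decide ((arr.take (k + 1)).sum > (arr.drop (k + 1)).sum)) = true
            then ans ++ [(k : Int) + 1] else ans) []
        (by
          intro acc k _
          simp only [zero_add]
          rw [left_sum_eq, right_sum_eq]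
          simp)]
  rw [PySem.List.foldl_append_if]
  simp

-- B's loop over enumerate, generalized over running sum p0, start index s and accumulator
theorem alt_fold (total : Int) : ∀ (xs : List Int) (s p0 : Int) (acc : List Int),
    ((PySem.List.enumerate xs s).foldl
      (fun (st : Int × List Int) p =>
        let pre := st.1 + p.2
        (pre, if pre > total - pre then st.2 ++ [p.1 + 1] else st.2)) (p0, acc)).2
    = acc ++ ((List.range xs.length).filter
        (fun k => decide (p0 + (xs.take (k + 1)).sum > total - (p0 + (xs.take (k + 1)).sum)))).map
          (fun (k : Nat) => s + (k : Int) + 1) := by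
  intro xs
  induction xs with
  | nil => intro s p0 acc; simp [PySem.List.enumerate]
  | cons x t ih =>
    intro s p0 acc
    rw [PySem.List.enumerate_cons, List.foldl_cons]
    show ((PySem.List.enumerate t (s + 1)).foldl _
        (p0 + x, if p0 + x > total - (p0 + x) then acc ++ [s + 1] else acc)).2 = _
    rw [ih (s + 1) (p0 + x)]
    have hmaps : ∀ (q : Nat → Bool),
        List.map (fun (k : Nat) => s + (1 + ((k : Int) + 1))) (List.filter q (List.range t.length))
        = List.map ((fun (k : Nat) => s + ((k : Int) + 1)) ∘ Nat.succ)
            (List.filter q (List.range t.length)) := by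
      intro q
      apply List.map_congr_left
      intro k _
      simp [Function.comp]
      ring
    have hfilter :
        List.filter (fun (k : Nat) => decide (total - (p0 + (x + (List.take (k + 1) t).sum))
            < p0 + (x + (List.take (k + 1) t).sum))) (List.range t.length)
        = List.filter ((fun (k : Nat) => decide (total - (p0 + (x + (List.take k t).sum))
            < p0 + (x + (List.take k t).sum))) ∘ Nat.succ) (List.range t.length) := by
      apply List.filter_congr
      intro k _
      simp [Function.comp]
    by_cases hc : p0 + x > total - (p0 + x) <;>
      simp [hc, List.range_succ_eq_map, List.filter_map, List.map_map,
        List.take_succ_cons, add_assoc, hmaps, hfilter]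

-- B is the same filter/map, comparing prefix sum with total minus prefix sum
theorem solve_alt_char (arr : List Int) :
    solve_alt arr = ((List.range (arr.length - 1)).filter
      (fun k => decide ((arr.take (k + 1)).sum > arr.sum - (arr.take (k + 1)).sum))).map
        (fun (k : Nat) => ((k : Int) + 1)) := by
  simp only [solve_alt]
  rw [PySem.List.slice_to_neg_one, alt_fold, List.length_dropLast]
  simp only [zero_add, List.nil_append]
  congr 1
  apply List.filter_congr
  intro k hk
  have hk' : k < arr.length - 1 := List.mem_range.mp hk
  rw [List.dropLast_eq_take, List.take_take, min_eq_left (by omega)]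

-- ===== VERDICT (by name: the statement is the Claim_ definition above) =====
theorem solve_spec : Claim_equal_solve := by
  intro arr _
  unfold Spec_solve
  rw [solve_char, solve_alt_char]
  congr 1
  apply List.filter_congr
  intro k hk
  have h := List.sum_take_add_sum_drop arr (k + 1)
  simp only [decide_eq_decide]
  omega
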